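-- pv_equiv track=rewrite | github.com/wtoro/aflorada | Gen_Functions/Basics.py | suma_consec
-- ===== SOURCE A (Python) =====
-- def suma_consec(lista):
--     suma = 0
--     n = 0
--     for i in reversed(lista):
--         if i:
--             for i in reversed(lista[0:len(lista)-n]):
--                 if i:
--                     suma = suma + 1
--                 else:
--                     break
--             break
--         n = n + 1
--     return suma
-- ===== SOURCE B (Python) =====
-- def suma_consec(lista):
--     suma = 0
--     started = False
--     for i in reversed(lista):
--         if i:
--             started = True
--             suma += 1
--         elif started:
--             break
--     return suma
-- ===== Notes on version B (the rewrite author's own statement) =====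
-- stated objective: simpler
-- what changed: One pass over reversed(lista) with a started flag replaces A's two scans (count trailing falsies, then re-slice and scan the truthy run again).
import Mathlib
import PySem

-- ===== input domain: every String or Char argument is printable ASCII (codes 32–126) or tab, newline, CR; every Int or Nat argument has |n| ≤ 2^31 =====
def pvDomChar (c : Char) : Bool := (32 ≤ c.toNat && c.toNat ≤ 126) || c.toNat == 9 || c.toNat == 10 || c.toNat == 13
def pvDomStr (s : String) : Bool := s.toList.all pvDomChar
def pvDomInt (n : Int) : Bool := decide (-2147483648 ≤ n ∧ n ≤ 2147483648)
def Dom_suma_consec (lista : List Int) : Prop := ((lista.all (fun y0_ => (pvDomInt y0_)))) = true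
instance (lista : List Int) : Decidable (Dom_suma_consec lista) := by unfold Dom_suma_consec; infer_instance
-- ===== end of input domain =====

-- B replaces A's two scans (count trailing falsies, then re-slice and rescan) by one reversed pass with a flag; objective: simpler.


-- ===== PORT A =====
-- inner loop: for i in reversed(lista[0:len(lista)-n]): if i: suma += 1 else: break
def sumaInner : List Int → Int → Int
  | [], suma => suma
  | i :: rest, suma => if i ≠ 0 then sumaInner rest (suma + 1) else suma

-- outer loop: iterates over reversed(lista) (the first argument keeps the whole list for the slice)
def sumaOuter (lista : List Int) : List Int → Int → Int → Int
  | [], suma, _ => suma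
  | i :: rest, suma, n =>
    if i ≠ 0 then
      sumaInner (PySem.List.slice lista (some 0) (some ((lista.length : Int) - n))).reverse suma
    else sumaOuter lista rest suma (n + 1)

def suma_consec (lista : List Int) : Int := sumaOuter lista lista.reverse 0 0

-- ===== PORT B =====
def altLoop : List Int → Bool → Int → Int
  | [], _, suma => suma
  | i :: rest, started, suma =>
    if i ≠ 0 then altLoop rest true (suma + 1)
    else if started then suma else altLoop rest started suma

def suma_consec_alt (lista : List Int) : Int := altLoop lista.reverse false 0

-- ===== PRECONDITION & SPEC =====
def Spec_suma_consec (lista : List Int) (out : Int) : Prop := out = suma_consec_alt lista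
instance (lista : List Int) (out : Int) : Decidable (Spec_suma_consec lista out) := by unfold Spec_suma_consec; infer_instance

-- ===== CLAIM (what is proved, stated in full; the proofs are below) =====
def Claim_equal_suma_consec : Prop := ∀ (lista : List Int), Dom_suma_consec lista → Spec_suma_consec lista (suma_consec lista)

-- ===== LEMMAS AND PROOFS =====

theorem altLoop_started (s : List Int) : ∀ suma, altLoop s true suma = sumaInner s suma := by
  induction s with
  | nil => intro suma; rfl
  | cons i rest ih =>
    intro suma
    by_cases hi : i = 0 <;> simp [altLoop, sumaInner, hi, ih]

theorem outer_eq_alt (lista : List Int) (s : List Int) :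
    ∀ k : Nat, s = lista.reverse.drop k → sumaOuter lista s 0 (k : Int) = altLoop s false 0 := by
  induction s with
  | nil => intro k _; rfl
  | cons i rest ih =>
    intro k hk
    have hklen : k < lista.length := by
      by_contra h
      have : lista.reverse.drop k = [] := by
        apply List.drop_eq_nil_of_le
        simpa using Nat.le_of_not_lt h
      rw [this] at hk; simp at hk
    by_cases hi : i = 0
    · -- falsy: A counts n+1; B keeps skipping
      have hrest : rest = lista.reverse.drop (k + 1) := by
        have := congrArg (List.drop 1) hk
        simpa [List.drop_drop, Nat.add_comm] using this
      have := ih (k + 1) hrest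
      simpa [sumaOuter, altLoop, hi, Int.natCast_add] using this
    · -- truthy: A re-slices and scans; B switches to counting
      have hslice : (PySem.List.slice lista (some 0) (some ((lista.length : Int) - (k : Int)))).reverse
          = i :: rest := by
        have h1 : ((lista.length : Int) - (k : Int)) = ((lista.length - k : Nat) : Int) := by
          omega
        rw [h1, PySem.List.slice_zero_start, PySem.List.slice_to_natCast]
        rw [List.reverse_take]
        have : lista.length - (lista.length - k) = k := by omega
        rw [this, ← hk]
      simp only [sumaOuter, altLoop, hi, ite_not, hslice]
      simp [hi, sumaInner, altLoop_started]

-- ===== VERDICT (by name: the statement is the Claim_ definition above) =====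
theorem suma_consec_spec : Claim_equal_suma_consec := by
  intro lista _
  unfold Spec_suma_consec suma_consec suma_consec_alt
  simpa using outer_eq_alt lista lista.reverse 0 rfl
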